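-- pv_equiv track=rewrite | github.com/YoSoyGeorgi/gs-scraping | src/update_contribuyentes.py | limpiar_y_separar_nombre
-- ===== SOURCE A (Python) =====
-- def limpiar_y_separar_nombre(nombre):
--     """Limpia las comillas y separa el régimen de la razón social."""
--     # Limpiar comillas dobles
--     nombre = nombre.replace('"', '')
--
--     # Lista de regímenes conocidos
--     regimenes = [
--         'S.A. DE C.V.',
--         'SA DE CV',
--         'S DE RL',
--         'S. DE R.L.',
--         'SRL DE CV',
--         'AC',
--         'A.C.',
--         'ABP',
--         'SAPI DE CV',
--         'S.A.P.I. DE C.V.',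
--         'SPR DE RL DE CV',
--         'S.P.R. DE R.L. DE C.V.'
--     ]
--
--     # Buscar el régimen más largo que coincida
--     regimen_encontrado = ''
--     razon_social = nombre
--
--     for regimen in sorted(regimenes, key=len, reverse=True):
--         if nombre.upper().endswith(regimen):
--             regimen_encontrado = regimen
--             razon_social = nombre[:-len(regimen)].strip(' ,. ')
--             break
--
--     return razon_social, regimen_encontrado
-- ===== SOURCE B (Python) =====
-- REGIMENES = {
--     'S.A. DE C.V.',
--     'SA DE CV',
--     'S DE RL',
--     'S. DE R.L.',
--     'SRL DE CV',
--     'AC',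
--     'A.C.',
--     'ABP',
--     'SAPI DE CV',
--     'S.A.P.I. DE C.V.',
--     'SPR DE RL DE CV',
--     'S.P.R. DE R.L. DE C.V.'
-- }
--
-- # Distinct suffix lengths, longest first: instead of testing each pattern with
-- # endswith, we cut one suffix per length and look it up in the hash set.
-- LONGITUDES = sorted({len(r) for r in REGIMENES}, reverse=True)
--
-- def limpiar_y_separar_nombre(nombre):
--     """Limpia las comillas y separa el régimen de la razón social."""
--     nombre = nombre.replace('"', '')
--     up = nombre.upper()
--     for L in LONGITUDES:
--         if L <= len(up):
--             sufijo = up[-L:]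
--             if sufijo in REGIMENES:
--                 return nombre[:-L].strip(' ,. '), sufijo
--     return nombre, ''
-- ===== Notes on version B (the rewrite author's own statement) =====
-- stated objective: alternative
-- what changed: Instead of sorting the pattern list and testing each regimen with endswith until the first match, B iterates over the distinct suffix lengths (longest first), cuts the single suffix of that length from the uppercased name, and looks it up in a hash set of regimenes.
import Mathlib
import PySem

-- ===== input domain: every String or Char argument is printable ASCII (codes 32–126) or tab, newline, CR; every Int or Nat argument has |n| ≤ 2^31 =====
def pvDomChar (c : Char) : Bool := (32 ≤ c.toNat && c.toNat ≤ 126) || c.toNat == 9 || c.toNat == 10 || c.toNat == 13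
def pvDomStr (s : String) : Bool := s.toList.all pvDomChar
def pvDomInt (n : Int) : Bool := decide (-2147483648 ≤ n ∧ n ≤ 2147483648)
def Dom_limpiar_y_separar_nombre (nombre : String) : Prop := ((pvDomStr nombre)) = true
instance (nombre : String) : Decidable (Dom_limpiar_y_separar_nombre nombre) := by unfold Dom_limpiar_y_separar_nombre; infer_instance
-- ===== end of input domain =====

-- B replaces A's pattern loop (sort regimenes by length, test each with endswith, break) by a
-- suffix-lookup algorithm: cut ONE suffix per distinct length (longest first) and look it up in a
-- hash set of regimenes — simpler decomposition, same values.

-- ===== PORT A =====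
def pvRegimenes : List String :=
  ["S.A. DE C.V.", "SA DE CV", "S DE RL", "S. DE R.L.", "SRL DE CV", "AC",
   "A.C.", "ABP", "SAPI DE CV", "S.A.P.I. DE C.V.", "SPR DE RL DE CV",
   "S.P.R. DE R.L. DE C.V."]

-- nombre[:-L].strip(' ,. ')  (the shared subexpression of both Pythons; A calls it with L = len(regimen))
def pvRazon (n : String) (L : Int) : String :=
  PySem.Str.stripChars (PySem.Str.slice n none (some (-L))) " ,. "

-- A's for-loop with break over the sorted pattern list
def pvLoopA (n : String) : List String → String × String
  | [] => (n, "")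
  | r :: rest =>
    if PySem.Str.endswith (PySem.Str.upper n) r then (pvRazon n (PySem.Str.len r), r)
    else pvLoopA n rest

def limpiar_y_separar_nombre (nombre : String) : String × String :=
  let n := PySem.Str.replace nombre "\"" ""
  pvLoopA n (PySem.List.sorted pvRegimenes PySem.Str.len true)

-- ===== PORT B =====
-- REGIMENES as a set (Source B's set literal)
def pvRegSet : PySem.Set String := PySem.Set.ofList pvRegimenes

-- LONGITUDES = sorted({len(r) for r in REGIMENES}, reverse=True)
def pvLongitudes : List Int :=
  PySem.List.sorted (PySem.Set.ofList (pvRegSet.map PySem.Str.len)) (fun x => x) true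

-- B's loop: one suffix per length, membership test in the set
def pvLoopB (n up : String) : List Int → String × String
  | [] => (n, "")
  | L :: rest =>
    if L ≤ PySem.Str.len up then
      let sufijo := PySem.Str.slice up (some (-L)) none
      if PySem.Set.contains pvRegSet sufijo then (pvRazon n L, sufijo)
      else pvLoopB n up rest
    else pvLoopB n up rest

def limpiar_y_separar_nombre_alt (nombre : String) : String × String :=
  let n := PySem.Str.replace nombre "\"" ""
  pvLoopB n (PySem.Str.upper n) pvLongitudes

-- ===== PRECONDITION & SPEC =====
def Spec_limpiar_y_separar_nombre (nombre : String) (out : String × String) : Prop := out = limpiar_y_separar_nombre_alt nombre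
instance (nombre : String) (out : String × String) : Decidable (Spec_limpiar_y_separar_nombre nombre out) := by unfold Spec_limpiar_y_separar_nombre; infer_instance

-- ===== CLAIM (what is proved, stated in full; the proofs are below) =====
def Claim_equal_limpiar_y_separar_nombre : Prop := ∀ (nombre : String), Dom_limpiar_y_separar_nombre nombre → Spec_limpiar_y_separar_nombre nombre (limpiar_y_separar_nombre nombre)

-- ===== LEMMAS AND PROOFS =====

-- endswith as a drop-and-compare (no length guard needed: a longer pattern never compares equal)
lemma pvEndswith_eq (s r : List Char) :
    PySem.Chars.endswith s r = (s.drop (s.length - r.length) == r) := by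
  rw [Bool.eq_iff_iff, PySem.Chars.endswith_iff, List.suffix_iff_eq_drop, beq_iff_eq, eq_comm]

lemma pvClamp (n : Nat) (L : Int) (h : 0 < L) : PySem.List.clampIdx n (-L) = n - L.toNat := by
  simp only [PySem.List.clampIdx]
  split_ifs <;> omega

-- u[-L:] at the char level
lemma pvSuf_toList (u : String) (L : Int) (h : 0 < L) :
    (PySem.Str.slice u (some (-L)) none).toList
      = u.toList.drop (u.toList.length - L.toNat) := by
  rw [PySem.Str.toList_slice, PySem.Chars.slice_eq_listSlice, PySem.List.slice_some_none,
      pvClamp _ _ h]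

-- one B step (length with a single regimen of that length) = one A step
lemma pvStep1 (L : Int) (hL : 0 < L) (r : String)
    (hr : r ∈ pvRegimenes) (hlen : r.toList.length = L.toNat)
    (hlenStr : PySem.Str.len r = L)
    (huniq : ∀ r' ∈ pvRegimenes, r'.toList.length = L.toNat → r' = r)
    (n u : String) (k : String × String) :
    (if L ≤ PySem.Str.len u then
       if PySem.Set.contains pvRegSet (PySem.Str.slice u (some (-L)) none)
       then (pvRazon n L, PySem.Str.slice u (some (-L)) none) else k
     else k)
    = (if PySem.Str.endswith u r then (pvRazon n (PySem.Str.len r), r) else k) := by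
  have hset : (pvRegSet : List String) = pvRegimenes := by decide
  rw [PySem.Str.endswith_eq, pvEndswith_eq, hlen, hlenStr]
  by_cases hc : L ≤ PySem.Str.len u
  · rw [if_pos hc]
    have hlu : L.toNat ≤ u.toList.length := by
      rw [PySem.Str.len_eq] at hc; omega
    have hsufl : (PySem.Str.slice u (some (-L)) none).toList
        = u.toList.drop (u.toList.length - L.toNat) := pvSuf_toList u L hL
    have hdl : (u.toList.drop (u.toList.length - L.toNat)).length = L.toNat := by
      rw [List.length_drop]; omega
    by_cases hm : PySem.Str.slice u (some (-L)) none = r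
    · have hcon : PySem.Set.contains pvRegSet (PySem.Str.slice u (some (-L)) none) = true := by
        unfold PySem.Set.contains
        rw [hset, List.contains_iff_mem, hm]; exact hr
      have hend : (u.toList.drop (u.toList.length - L.toNat) == r.toList) = true := by
        rw [beq_iff_eq, ← hsufl, hm]
      rw [hcon, if_pos rfl, hend, if_pos rfl, hm]
    · have hcon : PySem.Set.contains pvRegSet (PySem.Str.slice u (some (-L)) none) = false := by
        unfold PySem.Set.contains
        rw [hset]
        by_contra hq
        have hmem : PySem.Str.slice u (some (-L)) none ∈ pvRegimenes := by
          rw [← List.contains_iff_mem]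
          cases hval : List.contains pvRegimenes (PySem.Str.slice u (some (-L)) none)
          · exact absurd hval hq
          · rfl
        exact hm (huniq _ hmem (by rw [hsufl, hdl]))
      have hend : (u.toList.drop (u.toList.length - L.toNat) == r.toList) = false := by
        rw [beq_eq_false_iff_ne]
        intro he
        exact hm (String.toList_inj.mp (by rw [hsufl, he]))
      rw [hcon, if_neg (by simp), hend, if_neg (by simp)]
  · rw [if_neg hc]
    have hlu : u.toList.length < L.toNat := by
      rw [PySem.Str.len_eq] at hc; omega
    have hend : (u.toList.drop (u.toList.length - L.toNat) == r.toList) = false := by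
      rw [beq_eq_false_iff_ne]
      intro he
      have := congrArg List.length he
      rw [List.length_drop, hlen] at this
      omega
    rw [hend, if_neg (by simp)]

-- the length-10 step: two regimenes share the length; at most one can be the suffix
lemma pvStep2 (L : Int) (hL : 0 < L) (r1 r2 : String)
    (hr1 : r1 ∈ pvRegimenes) (hr2 : r2 ∈ pvRegimenes)
    (hlen1 : r1.toList.length = L.toNat) (hlen2 : r2.toList.length = L.toNat)
    (hlenStr1 : PySem.Str.len r1 = L) (hlenStr2 : PySem.Str.len r2 = L)
    (huniq : ∀ r' ∈ pvRegimenes, r'.toList.length = L.toNat → r' = r1 ∨ r' = r2)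
    (n u : String) (k : String × String) :
    (if L ≤ PySem.Str.len u then
       if PySem.Set.contains pvRegSet (PySem.Str.slice u (some (-L)) none)
       then (pvRazon n L, PySem.Str.slice u (some (-L)) none) else k
     else k)
    = (if PySem.Str.endswith u r1 then (pvRazon n (PySem.Str.len r1), r1)
       else if PySem.Str.endswith u r2 then (pvRazon n (PySem.Str.len r2), r2) else k) := by
  have hset : (pvRegSet : List String) = pvRegimenes := by decide
  rw [PySem.Str.endswith_eq, PySem.Str.endswith_eq, pvEndswith_eq, pvEndswith_eq,
      hlen1, hlen2, hlenStr1, hlenStr2]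
  by_cases hc : L ≤ PySem.Str.len u
  · rw [if_pos hc]
    have hsufl : (PySem.Str.slice u (some (-L)) none).toList
        = u.toList.drop (u.toList.length - L.toNat) := pvSuf_toList u L hL
    have hlu : L.toNat ≤ u.toList.length := by
      rw [PySem.Str.len_eq] at hc; omega
    have hdl : (u.toList.drop (u.toList.length - L.toNat)).length = L.toNat := by
      rw [List.length_drop]; omega
    by_cases hm1 : PySem.Str.slice u (some (-L)) none = r1
    · have hcon : PySem.Set.contains pvRegSet (PySem.Str.slice u (some (-L)) none) = true := by
        unfold PySem.Set.contains
        rw [hset, List.contains_iff_mem, hm1]; exact hr1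
      have hend : (u.toList.drop (u.toList.length - L.toNat) == r1.toList) = true := by
        rw [beq_iff_eq, ← hsufl, hm1]
      rw [hcon, if_pos rfl, hend, if_pos rfl, hm1]
    · by_cases hm2 : PySem.Str.slice u (some (-L)) none = r2
      · have hcon : PySem.Set.contains pvRegSet (PySem.Str.slice u (some (-L)) none) = true := by
          unfold PySem.Set.contains
          rw [hset, List.contains_iff_mem, hm2]; exact hr2
        have hend1 : (u.toList.drop (u.toList.length - L.toNat) == r1.toList) = false := by
          rw [beq_eq_false_iff_ne]
          intro he
          exact hm1 (String.toList_inj.mp (by rw [hsufl, he]))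
        have hend2 : (u.toList.drop (u.toList.length - L.toNat) == r2.toList) = true := by
          rw [beq_iff_eq, ← hsufl, hm2]
        rw [hcon, if_pos rfl, hend1, if_neg (by simp), hend2, if_pos rfl, hm2]
      · have hcon : PySem.Set.contains pvRegSet (PySem.Str.slice u (some (-L)) none) = false := by
          unfold PySem.Set.contains
          rw [hset]
          by_contra hq
          have hmem : PySem.Str.slice u (some (-L)) none ∈ pvRegimenes := by
            rw [← List.contains_iff_mem]
            cases hval : List.contains pvRegimenes (PySem.Str.slice u (some (-L)) none)
            · exact absurd hval hq
            · rfl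
          rcases huniq _ hmem (by rw [hsufl, hdl]) with h | h
          · exact hm1 h
          · exact hm2 h
        have hend1 : (u.toList.drop (u.toList.length - L.toNat) == r1.toList) = false := by
          rw [beq_eq_false_iff_ne]; intro he
          exact hm1 (String.toList_inj.mp (by rw [hsufl, he]))
        have hend2 : (u.toList.drop (u.toList.length - L.toNat) == r2.toList) = false := by
          rw [beq_eq_false_iff_ne]; intro he
          exact hm2 (String.toList_inj.mp (by rw [hsufl, he]))
        rw [hcon, if_neg (by simp), hend1, if_neg (by simp), hend2, if_neg (by simp)]
  · rw [if_neg hc]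
    have hlu : u.toList.length < L.toNat := by
      rw [PySem.Str.len_eq] at hc; omega
    have hend : ∀ r : List Char, r.length = L.toNat →
        (u.toList.drop (u.toList.length - L.toNat) == r) = false := by
      intro r hr
      rw [beq_eq_false_iff_ne]; intro he
      have := congrArg List.length he
      rw [List.length_drop, hr] at this
      omega
    rw [hend _ hlen1, if_neg (by simp), hend _ hlen2, if_neg (by simp)]

-- the sorted-descending pattern list (Python's stable sort on the literal list)
lemma pvSorted_lit :
    PySem.List.sorted pvRegimenes PySem.Str.len true =
      ["S.P.R. DE R.L. DE C.V.", "S.A.P.I. DE C.V.", "SPR DE RL DE CV",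
       "S.A. DE C.V.", "S. DE R.L.", "SAPI DE CV", "SRL DE CV", "SA DE CV",
       "S DE RL", "A.C.", "ABP", "AC"] := by decide

lemma pvLong_lit : pvLongitudes = [22, 16, 15, 12, 10, 9, 8, 7, 4, 3, 2] := by decide

-- ===== VERDICT (by name: the statement is the Claim_ definition above) =====
theorem limpiar_y_separar_nombre_spec : Claim_equal_limpiar_y_separar_nombre := by
  intro nombre _
  unfold Spec_limpiar_y_separar_nombre
  show limpiar_y_separar_nombre nombre = limpiar_y_separar_nombre_alt nombre
  simp only [limpiar_y_separar_nombre, limpiar_y_separar_nombre_alt]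
  rw [pvSorted_lit, pvLong_lit]
  simp only [pvLoopA, pvLoopB]
  rw [pvStep1 2 (by norm_num) "AC" (by decide) (by decide) (by decide) (by decide),
      pvStep1 3 (by norm_num) "ABP" (by decide) (by decide) (by decide) (by decide),
      pvStep1 4 (by norm_num) "A.C." (by decide) (by decide) (by decide) (by decide),
      pvStep1 7 (by norm_num) "S DE RL" (by decide) (by decide) (by decide) (by decide),
      pvStep1 8 (by norm_num) "SA DE CV" (by decide) (by decide) (by decide) (by decide),
      pvStep1 9 (by norm_num) "SRL DE CV" (by decide) (by decide) (by decide) (by decide),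
      pvStep2 10 (by norm_num) "S. DE R.L." "SAPI DE CV" (by decide) (by decide) (by decide)
        (by decide) (by decide) (by decide) (by decide),
      pvStep1 12 (by norm_num) "S.A. DE C.V." (by decide) (by decide) (by decide) (by decide),
      pvStep1 15 (by norm_num) "SPR DE RL DE CV" (by decide) (by decide) (by decide) (by decide),
      pvStep1 16 (by norm_num) "S.A.P.I. DE C.V." (by decide) (by decide) (by decide) (by decide),
      pvStep1 22 (by norm_num) "S.P.R. DE R.L. DE C.V." (by decide) (by decide) (by decide) (by decide)]
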